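-- pv_equiv track=rewrite | github.com/maxjmohr/adventofcode-2025 | day_06/main.py | turn_spaces_into_symbols
-- ===== SOURCE A (Python) =====
-- def turn_spaces_into_symbols(input: list[list[str]]) -> list[list[str]]:
--     """Turn all following spaces in the last row of a symbol into the same symbol (so + or *) until the next symbol is reached, and turn all other spaces into empty strings"""
--     last_row = input[-1]
--     new_last_row = []
--     current_symbol = ""
--
--     for char in last_row:
--         if char in ["+", "*"]:
--             current_symbol = char
--             new_last_row.append(char)
--         elif char == " ":
--             new_last_row.append(current_symbol if current_symbol else " ")
--         else:
--             new_last_row.append(char)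
--
--     input[-1] = new_last_row
--     return input
-- ===== SOURCE B (Python) =====
-- def turn_spaces_into_symbols(input: list[list[str]]) -> list[list[str]]:
--     """Segmentation version: cut the last row into chunks at each '+'/'*'
--     (every chunk after the first starts with its symbol), fill each chunk
--     independently with no running state, then flatten."""
--     row = input[-1]
--     chunks = []
--     cur = []
--     for c in row:
--         if c in ("+", "*"):
--             chunks.append(cur)
--             cur = [c]
--         else:
--             cur.append(c)
--     chunks.append(cur)
--
--     def fill(chunk):
--         sym = chunk[0]
--         return [sym] + [sym if c == " " else c for c in chunk[1:]]
--
--     input[-1] = chunks[0] + [x for ch in chunks[1:] for x in fill(ch)]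
--     return input
-- ===== Notes on version B (the rewrite author's own statement) =====
-- stated objective: alternative
-- what changed: Replaces A's single stateful scan (one loop threading current_symbol while appending) by a segmentation algorithm: partition the last row into chunks at each '+'/'*', then fill every chunk independently (stateless, chunk-local map by its leading symbol) and flatten; the untouched leading chunk keeps its spaces.
-- outside the precondition, e.g. on turn_spaces_into_symbols([]): A raises IndexError, B raises IndexError
import Mathlib
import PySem

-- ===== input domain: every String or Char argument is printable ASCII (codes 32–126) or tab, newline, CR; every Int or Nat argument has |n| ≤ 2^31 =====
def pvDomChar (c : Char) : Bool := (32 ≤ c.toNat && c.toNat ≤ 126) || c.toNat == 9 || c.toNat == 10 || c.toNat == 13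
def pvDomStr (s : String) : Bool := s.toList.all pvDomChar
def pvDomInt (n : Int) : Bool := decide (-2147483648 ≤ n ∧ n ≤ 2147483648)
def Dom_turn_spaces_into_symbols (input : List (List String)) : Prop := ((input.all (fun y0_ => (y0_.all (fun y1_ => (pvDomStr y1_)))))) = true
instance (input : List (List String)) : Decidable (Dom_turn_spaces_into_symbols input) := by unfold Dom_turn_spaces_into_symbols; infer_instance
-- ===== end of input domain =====

-- ===== PORT A =====
-- B replaces A's single stateful scan by segmentation: chunk the row at each symbol,
-- fill each chunk independently, flatten ('alternative', same cost). Both A and B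
-- mutate input[-1] in place; the equivalence is about the return value.
-- loop of A: walks last_row carrying (new_last_row so far, current_symbol)
def tsisLoopA : List String → List String → String → List String
  | [], acc, _ => acc
  | c :: rest, acc, sym =>
    if c = "+" ∨ c = "*" then tsisLoopA rest (acc ++ [c]) c
    else if c = " " then tsisLoopA rest (acc ++ [if sym ≠ "" then sym else " "]) sym
    else tsisLoopA rest (acc ++ [c]) sym

def turn_spaces_into_symbols (input : List (List String)) : List (List String) :=
  match PySem.List.pyGet? input (-1) with
  | none => []   -- unreachable: Pre_ excludes the empty list (Python raises IndexError)
  | some last_row => input.dropLast ++ [tsisLoopA last_row [] ""]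

-- ===== PORT B =====
-- first pass of B: partition the row into chunks, cutting before every '+'/'*'
def tsisChunks : List String → List String → List (List String)
  | [], cur => [cur]
  | c :: rest, cur =>
    if c = "+" ∨ c = "*" then cur :: tsisChunks rest [c]
    else tsisChunks rest (cur ++ [c])

-- second pass of B: fill one chunk from its leading symbol (chunks after the first
-- are never empty; [] is unreachable, where Python's chunk[0] would raise)
def tsisFill : List String → List String
  | [] => []
  | sym :: rest => sym :: rest.map (fun c => if c = " " then sym else c)

def turn_spaces_into_symbols_alt (input : List (List String)) : List (List String) :=
  match PySem.List.pyGet? input (-1) with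
  | none => []   -- unreachable: Pre_ excludes the empty list (Python raises IndexError)
  | some last_row =>
    let chunks := tsisChunks last_row []
    input.dropLast ++ [chunks.headD [] ++ (chunks.drop 1).flatMap tsisFill]

-- ===== PRECONDITION & SPEC =====
-- Pre_ excludes only the empty outer list, on which Python A raises IndexError at input[-1].
def Pre_turn_spaces_into_symbols (input : List (List String)) : Prop := input ≠ []
instance (input : List (List String)) : Decidable (Pre_turn_spaces_into_symbols input) := by unfold Pre_turn_spaces_into_symbols; infer_instance
def pvWitness_turn_spaces_into_symbols : List (List String) := [["+", " ", "x", " ", "*", " "]]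
def Spec_turn_spaces_into_symbols (input : List (List String)) (out : List (List String)) : Prop := out = turn_spaces_into_symbols_alt input
instance (input : List (List String)) (out : List (List String)) : Decidable (Spec_turn_spaces_into_symbols input out) := by unfold Spec_turn_spaces_into_symbols; infer_instance

-- ===== CLAIM (what is proved, stated in full; the proofs are below) =====
def Claim_equal_turn_spaces_into_symbols : Prop := ∀ (input : List (List String)), Dom_turn_spaces_into_symbols input → Pre_turn_spaces_into_symbols input → Spec_turn_spaces_into_symbols input (turn_spaces_into_symbols input)

-- ===== LEMMAS AND PROOFS =====
-- the accumulator of tsisChunks only extends the head chunk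
theorem tsisChunks_cur (l : List String) : ∀ cur : List String,
    tsisChunks l cur = (cur ++ (tsisChunks l []).headD []) :: (tsisChunks l []).drop 1 := by
  induction l with
  | nil => intro cur; simp [tsisChunks]
  | cons c rest ih =>
    intro cur
    by_cases h : c = "+" ∨ c = "*"
    · simp [tsisChunks, h]
    · simp only [tsisChunks, if_neg h]
      rw [ih (cur ++ [c]), ih ([] ++ [c])]
      simp

-- A's loop after a symbol sym equals acc ++ sym-filled head chunk ++ filled rest
theorem tsisLoopA_sym (l : List String) : ∀ (acc : List String) (sym : String), sym ≠ "" →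
    tsisLoopA l acc sym =
      acc ++ ((tsisChunks l []).headD []).map (fun c => if c = " " then sym else c)
          ++ ((tsisChunks l []).drop 1).flatMap tsisFill := by
  induction l with
  | nil => intro acc sym _; simp [tsisLoopA, tsisChunks]
  | cons c rest ih =>
    intro acc sym hsym
    by_cases h1 : c = "+" ∨ c = "*"
    · have hc : c ≠ "" := by rcases h1 with h | h <;> subst h <;> decide
      simp only [tsisLoopA, if_pos h1, tsisChunks]
      rw [ih (acc ++ [c]) c hc, tsisChunks_cur rest [c]]
      simp [tsisFill]
    · by_cases h2 : c = " "
      · simp only [tsisLoopA, if_neg h1, if_pos h2, tsisChunks]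
        rw [ih (acc ++ [if sym ≠ "" then sym else " "]) sym hsym, tsisChunks_cur rest ([] ++ [c])]
        simp [h2, hsym]
      · simp only [tsisLoopA, if_neg h1, if_neg h2, tsisChunks]
        rw [ih (acc ++ [c]) sym hsym, tsisChunks_cur rest ([] ++ [c])]
        simp [h2]

-- A's loop started with the empty symbol equals B's chunk-and-fill result
theorem tsisLoopA_eq (l : List String) : ∀ acc : List String,
    tsisLoopA l acc "" =
      acc ++ (tsisChunks l []).headD [] ++ ((tsisChunks l []).drop 1).flatMap tsisFill := by
  induction l with
  | nil => intro acc; simp [tsisLoopA, tsisChunks]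
  | cons c rest ih =>
    intro acc
    by_cases h1 : c = "+" ∨ c = "*"
    · have hc : c ≠ "" := by rcases h1 with h | h <;> subst h <;> decide
      simp only [tsisLoopA, if_pos h1, tsisChunks]
      rw [tsisLoopA_sym rest (acc ++ [c]) c hc, tsisChunks_cur rest [c]]
      simp [tsisFill]
    · by_cases h2 : c = " "
      · simp only [tsisLoopA, if_neg h1, if_pos h2, tsisChunks]
        simp only [ne_eq, not_true_eq_false, if_false]
        rw [ih (acc ++ [" "]), tsisChunks_cur rest ([] ++ [c])]
        simp [h2]
      · simp only [tsisLoopA, if_neg h1, if_neg h2, tsisChunks]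
        rw [ih (acc ++ [c]), tsisChunks_cur rest ([] ++ [c])]
        simp

-- ===== VERDICT (by name: the statement is the Claim_ definition above) =====
theorem turn_spaces_into_symbols_spec : Claim_equal_turn_spaces_into_symbols := by
  intro input _ hpre
  unfold Spec_turn_spaces_into_symbols turn_spaces_into_symbols turn_spaces_into_symbols_alt
  cases hlr : PySem.List.pyGet? input (-1) with
  | none =>
    exfalso; apply hpre
    cases input with
    | nil => rfl
    | cons a l => simp [PySem.List.pyGet?, PySem.List.pyIdx?] at hlr
  | some last_row => simp [tsisLoopA_eq]
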